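-- pv_equiv track=rewrite | github.com/tranductri2003/competitive_programming | ICPC/ICPC North Central NA Contest 2018/B Kaleidoscopic Palindromes.py | check
-- ===== SOURCE A (Python) =====
-- def check(i,j):
--     a=list()
--     while i !=0:
--         a.append(i%j)
--         i=i//j
--     if a==a[::-1]:
--         return True
--     else:
--         return False
-- ===== SOURCE B (Python) =====
-- def check(i, j):
--     def rev_into(n, acc):
--         # fold the base-j digits of n onto acc, most-recent digit most significant
--         while n != 0:
--             acc, n = acc * j + n % j, n // j
--         return acc
--     return rev_into(i, 0) == i
-- ===== Notes on version B (the rewrite author's own statement) =====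
-- stated objective: idiomatic
-- what changed: B never materialises the digit list: a helper folds the base-j digits of i into a single integer accumulator (the base-j reversal of i) and the palindrome test becomes an arithmetic equality with the original value, instead of A's list building plus reversed-slice comparison.
import Mathlib
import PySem

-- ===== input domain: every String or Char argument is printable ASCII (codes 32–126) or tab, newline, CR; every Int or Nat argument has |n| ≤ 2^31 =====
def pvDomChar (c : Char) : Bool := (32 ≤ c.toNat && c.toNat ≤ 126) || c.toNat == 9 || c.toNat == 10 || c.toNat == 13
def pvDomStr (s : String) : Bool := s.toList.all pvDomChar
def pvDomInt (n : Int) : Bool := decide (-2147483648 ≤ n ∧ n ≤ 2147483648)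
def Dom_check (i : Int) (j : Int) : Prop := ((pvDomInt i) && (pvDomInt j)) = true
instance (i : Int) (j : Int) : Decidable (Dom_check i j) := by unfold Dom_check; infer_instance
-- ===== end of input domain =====

-- B never builds A's digit list: it folds the digits into one integer accumulator (the
-- base-j reversal of i) and compares it with the original value (objective: idiomatic).

-- ===== PORT A =====
-- A's while-loop collecting i % j into a list; the fuel argument only makes the loop total
-- (none = fuel exhausted or ZeroDivisionError; both are outside Pre_check ∩ Dom_check).
def checkDigits : Nat → Int → Int → Option (List Int)
  | 0, _, _ => none
  | fuel+1, i, j =>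
    if i = 0 then some []
    else
      match PySem.Int.divmod? i j with
      | none => none
      | some (q, r) => (checkDigits fuel q j).map (fun a => r :: a)

def check (i : Int) (j : Int) : Bool :=
  match checkDigits (2 * i.natAbs + 2) i j with
  | some a => decide (a = a.reverse)   -- a == a[::-1]
  | none => false

-- ===== PORT B =====
-- B's loop: rev_into(n, acc) folds n's base-j digits onto acc; fuel only makes it total
-- (enough fuel is always available on terminating inputs, see loop_agree below).
def revLoop : Nat → Int → Int → Int → Int
  | 0, _, _, acc => acc
  | fuel+1, j, n, acc =>
    if n = 0 then acc
    else revLoop fuel j (PySem.Int.floordiv n j) (acc * j + PySem.Int.mod n j)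

def check_alt (i : Int) (j : Int) : Bool :=
  decide (revLoop (2 * i.natAbs + 2) j i 0 = i)   -- rev_into(i, 0) == i

-- ===== PRECONDITION & SPEC =====
-- Pre_check admits exactly the inputs where the Python loop terminates: i = 0 (loop skipped,
-- any j, even 0), positive i with base j ≥ 2, or any i with base j ≤ -2.  Excluded inputs
-- never return: j = 0 with i ≠ 0 raises ZeroDivisionError, j ∈ {-1, 1} with i ≠ 0 and
-- negative i with j ≥ 2 make the loop spin forever.
def Pre_check (i : Int) (j : Int) : Prop := i = 0 ∨ (0 < i ∧ 2 ≤ j) ∨ j ≤ -2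
instance (i : Int) (j : Int) : Decidable (Pre_check i j) := by unfold Pre_check; infer_instance

def pvWitness_check : Int × Int := (9, 2)

def Spec_check (i : Int) (j : Int) (out : Bool) : Prop := out = check_alt i j
instance (i : Int) (j : Int) (out : Bool) : Decidable (Spec_check i j out) := by unfold Spec_check; infer_instance

-- ===== CLAIM (what is proved, stated in full; the proofs are below) =====
def Claim_equal_check : Prop := ∀ (i : Int) (j : Int), Dom_check i j → Pre_check i j → Spec_check i j (check i j)

-- ===== LEMMAS AND PROOFS =====

-- measure that strictly drops at each loop iteration: gives fuel sufficiency below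
def pvMu (n : Int) : Nat := 2 * n.natAbs + (if 0 < n then 1 else 0)

lemma pvMu_step (n j : Int) (hn : n ≠ 0) (h : (0 < n ∧ 2 ≤ j) ∨ j ≤ -2) :
    pvMu (PySem.Int.floordiv n j) < pvMu n := by
  have hid := PySem.Int.floordiv_mul_add_mod n j
  set q := PySem.Int.floordiv n j with hq
  set r := PySem.Int.mod n j with hr
  rcases h with ⟨hn0, hj⟩ | hj
  · have hrlo : 0 ≤ r := hr ▸ PySem.Int.mod_nonneg n (by omega)
    have hrhi : r < j := hr ▸ PySem.Int.mod_lt n (by omega)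
    have hq0 : 0 ≤ q := by nlinarith
    have h2q : 2 * q ≤ n := by nlinarith
    unfold pvMu
    split <;> omega
  · obtain ⟨hrlo, hrhi⟩ := PySem.Int.mod_neg_bounds n (b := j) (by omega)
    rw [← hr] at hrlo hrhi
    rcases lt_trichotomy n 0 with hneg | h0 | hpos
    · -- n < 0, j ≤ -2 : q ≥ 0 and 2q ≤ |n|
      have hq0 : 0 ≤ q := by nlinarith
      have h2q : 2 * q ≤ -n := by nlinarith
      have : q = 0 ∨ 1 ≤ q := by omega
      unfold pvMu
      rcases this with hq' | hq'
      · simp [hq']; omega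
      · have hn2 : n ≤ -2 := by nlinarith
        split <;> omega
    · exact absurd h0 hn
    · -- n > 0, j ≤ -2 : q ≤ 0 and -q ≤ n
      have hq0 : q ≤ 0 := by nlinarith
      have hlow : -q ≤ n := by nlinarith
      unfold pvMu
      split <;> omega


-- value of a little-endian digit list (first digit least significant)
def evalLE (j : Int) : List Int → Int
  | [] => 0
  | d :: t => d + j * evalLE j t

-- the loop invariant: under Pre and enough fuel, A's loop returns the digit list and
-- B's loop returns exactly its left fold onto the accumulator
lemma loop_agree (fuel : Nat) (n j acc : Int)
    (hpre : n = 0 ∨ (0 < n ∧ 2 ≤ j) ∨ j ≤ -2) (hfuel : pvMu n < fuel) :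
    ∃ a, checkDigits fuel n j = some a ∧
      revLoop fuel j n acc = a.foldl (fun acc d => acc * j + d) acc := by
  induction fuel generalizing n acc with
  | zero => omega
  | succ fuel ih =>
    by_cases hn : n = 0
    · subst hn
      exact ⟨[], by simp [checkDigits], by simp [revLoop]⟩
    · have hcond : (0 < n ∧ 2 ≤ j) ∨ j ≤ -2 := by rcases hpre with h | h | h <;> [omega; exact Or.inl h; exact Or.inr h]
      have hj : j ≠ 0 := by rcases hcond with ⟨_, h2⟩ | h2 <;> omega
      have hdm : PySem.Int.divmod? n j = some (PySem.Int.floordiv n j, PySem.Int.mod n j) := by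
        simp [PySem.Int.divmod?, PySem.Int.floordiv, PySem.Int.mod, hj]
      have hpre' : PySem.Int.floordiv n j = 0 ∨ (0 < PySem.Int.floordiv n j ∧ 2 ≤ j) ∨ j ≤ -2 := by
        rcases hcond with ⟨hn0, hj2⟩ | hj2
        · have hid := PySem.Int.floordiv_mul_add_mod n j
          have hrlo : 0 ≤ PySem.Int.mod n j := PySem.Int.mod_nonneg n (by omega)
          have hrhi : PySem.Int.mod n j < j := PySem.Int.mod_lt n (by omega)
          have : 0 ≤ PySem.Int.floordiv n j := by nlinarith
          omega
        · exact Or.inr (Or.inr hj2)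
      have hlt := pvMu_step n j hn hcond
      obtain ⟨a, ha, hrev⟩ := ih (PySem.Int.floordiv n j) (acc * j + PySem.Int.mod n j) hpre' (by omega)
      refine ⟨PySem.Int.mod n j :: a, ?_, ?_⟩
      · simp [checkDigits, hn, hdm, ha]
      · simp [revLoop, hn, hrev]

-- B's loop is A's digit list under a Horner fold; relate that fold to the list's value
lemma evalLE_append (j : Int) (l : List Int) (d : Int) :
    evalLE j (l ++ [d]) = evalLE j l + d * j ^ l.length := by
  induction l with
  | nil => simp [evalLE]
  | cons x t ih => simp [evalLE, ih, pow_succ]; ring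

lemma foldl_horner (j : Int) (a : List Int) (r : Int) :
    a.foldl (fun acc d => acc * j + d) r = evalLE j a.reverse + r * j ^ a.length := by
  induction a generalizing r with
  | nil => simp [evalLE]
  | cons d t ih =>
    simp only [List.foldl_cons, List.reverse_cons, ih, evalLE_append, List.length_cons,
      List.length_reverse, pow_succ]
    ring

-- a canonical digit (one equal to its own Python remainder) is recovered by % and dropped by //
lemma canon_mod (d t j : Int) (hc : PySem.Int.mod d j = d) :
    PySem.Int.mod (d + j * t) j = d := by
  simp [PySem.Int.mod] at *; exact hc

-- A's loop returns the base-j digits of i: they evaluate back to i and are canonical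
lemma digits_spec (fuel : Nat) (i j : Int) (a : List Int)
    (h : checkDigits fuel i j = some a) :
    evalLE j a = i ∧ ∀ d ∈ a, PySem.Int.mod d j = d := by
  induction fuel generalizing i a with
  | zero => simp [checkDigits] at h
  | succ fuel ih =>
    simp only [checkDigits] at h
    split at h
    · obtain rfl := Option.some_injective _ h
      simp_all [evalLE]
    · cases hdm : PySem.Int.divmod? i j with
      | none => simp [hdm] at h
      | some qr =>
        obtain ⟨q, r⟩ := qr
        rw [hdm] at h
        simp only [Option.map_eq_some_iff] at h
        obtain ⟨t, ht, rfl⟩ := h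
        obtain ⟨hev, hcan⟩ := ih q t ht
        have hj : j ≠ 0 := by
          intro hj0; simp [PySem.Int.divmod?, hj0] at hdm
        have hqr : q = PySem.Int.floordiv i j ∧ r = PySem.Int.mod i j := by
          simp [PySem.Int.divmod?, hj] at hdm
          exact ⟨hdm.1.symm, hdm.2.symm⟩
        obtain ⟨rfl, rfl⟩ := hqr
        constructor
        · simp only [evalLE, hev]
          linarith [PySem.Int.floordiv_mul_add_mod i j,
            mul_comm j (PySem.Int.floordiv i j)]
        · intro d hd
          rcases List.mem_cons.mp hd with rfl | hd
          · simp [PySem.Int.mod]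
          · exact hcan d hd

-- two equal-length lists of canonical digits with the same value are equal
lemma eval_uniq (j : Int) (hj : j ≠ 0) :
    ∀ (a c : List Int), (∀ d ∈ a, PySem.Int.mod d j = d) → (∀ d ∈ c, PySem.Int.mod d j = d) →
      a.length = c.length → evalLE j a = evalLE j c → a = c := by
  intro a
  induction a with
  | nil => intro c _ _ hlen _; exact (List.length_eq_zero_iff.mp hlen.symm).symm
  | cons d t ih =>
    intro c hca hcc hlen hev
    cases c with
    | nil => simp at hlen
    | cons e s =>
      have hd : d = e := by
        have h1 := canon_mod d (evalLE j t) j (hca d (by simp))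
        have h2 := canon_mod e (evalLE j s) j (hcc e (by simp))
        rw [show (d + j * evalLE j t) = (e + j * evalLE j s) from hev] at h1
        rw [h2] at h1; exact h1.symm
      subst hd
      have htail : evalLE j t = evalLE j s := by
        have : j * evalLE j t = j * evalLE j s := by
          have := hev; simp only [evalLE] at this; omega
        exact mul_left_cancel₀ hj this
      have := ih s (fun x hx => hca x (by simp [hx])) (fun x hx => hcc x (by simp [hx]))
        (by simpa using hlen) htail
      rw [this]

-- ===== VERDICT (by name: the statement is the Claim_ definition above) =====
theorem check_spec : Claim_equal_check := by
  intro i j _ hpre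
  unfold Spec_check check check_alt
  obtain ⟨a, ha, hrev⟩ := loop_agree (2 * i.natAbs + 2) i j 0 hpre (by unfold pvMu; split <;> omega)
  rw [ha, hrev, foldl_horner]
  simp only [zero_mul, add_zero]
  obtain ⟨heval, hcanon⟩ := digits_spec _ i j a ha
  rw [← heval]
  cases ha' : a with
  | nil => simp [evalLE]
  | cons d t =>
    have hj : j ≠ 0 := by
      have hi : i ≠ 0 := by
        intro hi0; subst hi0
        rw [show checkDigits (2 * (0:Int).natAbs + 2) 0 j = some [] by simp [checkDigits]] at ha
        simp [ha'] at ha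
      rcases hpre with rfl | ⟨_, h2⟩ | h2 <;> omega
    rw [← ha']
    have : (a = a.reverse) ↔ (evalLE j a.reverse = evalLE j a) := by
      constructor
      · intro he; rw [← he]
      · intro he
        exact (eval_uniq j hj a.reverse a
          (fun x hx => hcanon x (List.mem_reverse.mp hx)) hcanon
          (by simp) he).symm
    simp only [decide_eq_decide]
    exact this
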